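-- pv_equiv track=rewrite | github.com/ianquimot/DFA-AutomataTheory | example2p9.py | dfa_accept
-- ===== SOURCE A (Python) =====
-- def dfa_accept(input_string):
--     state = 0  # Initial state where both counts are even
--     for char in input_string:
--         if char == '0':
--             if state == 0:
--                 state = 1
--             elif state == 1:
--                 state = 0
--             elif state == 2:
--                 state = 3
--             elif state == 3:
--                 state = 2
--         elif char == '1':
--             if state == 0:
--                 state = 2
--             elif state == 1:
--                 state = 3
--             elif state == 2:
--                 state = 0
--             elif state == 3:
--                 state = 1
--
--     # Accept only if the final state is 0
--     return state == 0
-- ===== SOURCE B (Python) =====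
-- def dfa_accept(input_string):
--     return input_string.count('0') % 2 == 0 and input_string.count('1') % 2 == 0
-- ===== Notes on version B (the rewrite author's own statement) =====
-- stated objective: simpler
-- what changed: Replaced the explicit 4-state DFA transition loop with two character-count parity checks via str.count, since the DFA state is exactly the pair of parities of zero/one occurrences.
import Mathlib
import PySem

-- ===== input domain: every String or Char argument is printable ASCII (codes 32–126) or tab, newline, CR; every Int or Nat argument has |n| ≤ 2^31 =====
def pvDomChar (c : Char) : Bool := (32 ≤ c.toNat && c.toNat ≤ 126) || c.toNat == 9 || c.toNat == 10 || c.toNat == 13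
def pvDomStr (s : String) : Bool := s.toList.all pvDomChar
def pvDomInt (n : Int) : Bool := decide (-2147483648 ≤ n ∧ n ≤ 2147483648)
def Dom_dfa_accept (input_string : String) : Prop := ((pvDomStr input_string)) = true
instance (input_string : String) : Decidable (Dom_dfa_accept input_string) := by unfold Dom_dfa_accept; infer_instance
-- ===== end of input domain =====

-- B replaces the 4-state DFA loop with two character-count parity checks (objective: simpler).

-- ===== PORT A =====
def dfaStep (state : Int) (char : Char) : Int :=
  if char == '0' then
    if state == 0 then 1
    else if state == 1 then 0
    else if state == 2 then 3
    else if state == 3 then 2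
    else state
  else if char == '1' then
    if state == 0 then 2
    else if state == 1 then 3
    else if state == 2 then 0
    else if state == 3 then 1
    else state
  else state

def dfa_accept (input_string : String) : Bool :=
  (input_string.toList.foldl dfaStep 0) == 0

-- ===== PORT B =====
def dfa_accept_alt (input_string : String) : Bool :=
  (PySem.Str.count input_string "0") % 2 == 0 && (PySem.Str.count input_string "1") % 2 == 0

-- ===== PRECONDITION & SPEC =====
def Spec_dfa_accept (input_string : String) (out : Bool) : Prop := out = dfa_accept_alt input_string
instance (input_string : String) (out : Bool) : Decidable (Spec_dfa_accept input_string out) := by unfold Spec_dfa_accept; infer_instance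

-- ===== CLAIM (what is proved, stated in full; the proofs are below) =====
def Claim_equal_dfa_accept : Prop := ∀ (input_string : String), Dom_dfa_accept input_string → Spec_dfa_accept input_string (dfa_accept input_string)

-- ===== LEMMAS AND PROOFS =====

-- the DFA state as a pair of parity bits
def encSt (b0 b1 : Bool) : Int := (if b0 then 1 else 0) + (if b1 then 2 else 0)

theorem dfaStep_enc (b0 b1 : Bool) (c : Char) :
    dfaStep (encSt b0 b1) c =
      if c == '0' then encSt (!b0) b1
      else if c == '1' then encSt b0 (!b1)
      else encSt b0 b1 := by
  cases b0 <;> cases b1 <;> simp [dfaStep, encSt]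

theorem parity_succ (n : Nat) : ((n + 1) % 2 == 1) = !(n % 2 == 1) := by
  cases h : n % 2 == 1 <;> simp_all <;> omega

theorem foldl_dfaStep_enc (l : List Char) (b0 b1 : Bool) :
    l.foldl dfaStep (encSt b0 b1) =
      encSt (b0 ^^ (l.count '0' % 2 == 1)) (b1 ^^ (l.count '1' % 2 == 1)) := by
  induction l generalizing b0 b1 with
  | nil => simp
  | cons c t ih =>
    simp only [List.foldl_cons, dfaStep_enc]
    by_cases h0 : c = '0'
    · subst h0
      rw [if_pos (by simp), ih]
      simp only [List.count_cons, if_pos rfl, if_neg (by decide : ¬('0' : Char) = '1'),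
        Nat.add_zero, parity_succ]
      cases b0 <;> cases h : (t.count '0' % 2 == 1) <;> simp_all [parity_succ]
    · by_cases h1 : c = '1'
      · subst h1
        rw [if_neg (by simp), if_pos (by simp), ih]
        simp only [List.count_cons, if_pos rfl, if_neg (by decide : ¬('1' : Char) = '0'),
          Nat.add_zero, parity_succ]
        cases b1 <;> cases h : (t.count '1' % 2 == 1) <;> simp_all [parity_succ]
      · rw [if_neg (by simp [h0]), if_neg (by simp [h1]), ih]
        simp [List.count_cons, h0, h1]

theorem countgo_singleton (c : Char) :
    ∀ (fuel : Nat) (l : List Char) (acc : Nat), l.length ≤ fuel →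
      PySem.Chars.count.go [c] fuel l acc = acc + l.count c := by
  intro fuel
  induction fuel with
  | zero =>
    intro l acc h
    have : l = [] := List.eq_nil_of_length_eq_zero (Nat.le_zero.mp h)
    subst this
    simp [PySem.Chars.count.go]
  | succ n ih =>
    intro l acc h
    cases l with
    | nil => simp [PySem.Chars.count.go]
    | cons x t =>
      simp only [PySem.Chars.count.go]
      by_cases hx : x = c
      · subst hx
        rw [if_pos (by simp [List.isPrefixOf])]
        simp only [List.length_cons] at h
        rw [ih _ _ (by simpa using h)]
        simp [List.count_cons]
        omega
      · rw [if_neg (by simp [List.isPrefixOf, hx]; exact fun hc => absurd hc.symm hx)]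
        simp only [List.length_cons] at h
        rw [ih _ _ (by omega)]
        simp [List.count_cons, hx]

theorem chars_count_singleton (l : List Char) (c : Char) :
    PySem.Chars.count l [c] = l.count c := by
  have h := countgo_singleton c l.length l 0 le_rfl
  simp only [PySem.Chars.count, List.isEmpty_cons]
  simpa using h

-- ===== VERDICT (by name: the statement is the Claim_ definition above) =====
theorem dfa_accept_spec : Claim_equal_dfa_accept := by
  intro s _
  unfold Spec_dfa_accept dfa_accept dfa_accept_alt
  have h0 : PySem.Str.count s "0" = s.toList.count '0' := by
    have := chars_count_singleton s.toList '0'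
    simpa [PySem.Str.count] using this
  have h1 : PySem.Str.count s "1" = s.toList.count '1' := by
    have := chars_count_singleton s.toList '1'
    simpa [PySem.Str.count] using this
  rw [h0, h1]
  have : (0 : Int) = encSt false false := by simp [encSt]
  rw [this, foldl_dfaStep_enc]
  cases hh0 : s.toList.count '0' % 2 == 1 <;> cases hh1 : s.toList.count '1' % 2 == 1 <;>
    simp_all [encSt] <;> omega
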